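-- pv_equiv track=rewrite | github.com/jack-slash/tuners | g3000.py | sub_4dcf20
-- ===== SOURCE A (Python) =====
-- def sub_4dcf20(st:int) -> int:
--     eax=0x80000000
--     v3=0
--     m_v4 = {}
--     while (v3 < 8):
--         v4=0
--         v5=32
--         while v5:
--             if (eax & st):
--                 v4 = v4 | v5
--             eax = eax << 1
--             if eax > 0x80000000:
--                 eax = 0x1
--             v5 = v5 >> 1
--         eax = eax >>2
--         v3 +=1
--         m_v4[v3] = v4
--     return(m_v4) # returns dict of decs
-- ===== SOURCE B (Python) =====
-- # Table-driven rewrite: A's rotating-mask scan is precomputed into a static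
-- # permutation table of input-bit positions; each output value ORs fixed weights.
-- PERM = [
--     [31, 0, 1, 2, 3, 4],
--     [3, 4, 5, 6, 7, 8],
--     [7, 8, 9, 10, 11, 12],
--     [11, 12, 13, 14, 15, 16],
--     [15, 16, 17, 18, 19, 20],
--     [19, 20, 21, 22, 23, 24],
--     [23, 24, 25, 26, 27, 28],
--     [27, 28, 29, 30, 31, 0],
-- ]
-- WEIGHTS = [32, 16, 8, 4, 2, 1]
--
-- def sub_4dcf20(st: int) -> int:
--     m = {}
--     for i, row in enumerate(PERM):
--         v = 0
--         for pos, w in zip(row, WEIGHTS):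
--             if st & (1 << pos):
--                 v |= w
--         m[i + 1] = v
--     return m
-- ===== Notes on version B (the rewrite author's own statement) =====
-- stated objective: idiomatic
-- what changed: Replaced the stateful rotating-mask scan (eax shifted/reset/corrected across 48 iterations) with a static precomputed permutation table of input-bit positions iterated with zip/enumerate.
import Mathlib
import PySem

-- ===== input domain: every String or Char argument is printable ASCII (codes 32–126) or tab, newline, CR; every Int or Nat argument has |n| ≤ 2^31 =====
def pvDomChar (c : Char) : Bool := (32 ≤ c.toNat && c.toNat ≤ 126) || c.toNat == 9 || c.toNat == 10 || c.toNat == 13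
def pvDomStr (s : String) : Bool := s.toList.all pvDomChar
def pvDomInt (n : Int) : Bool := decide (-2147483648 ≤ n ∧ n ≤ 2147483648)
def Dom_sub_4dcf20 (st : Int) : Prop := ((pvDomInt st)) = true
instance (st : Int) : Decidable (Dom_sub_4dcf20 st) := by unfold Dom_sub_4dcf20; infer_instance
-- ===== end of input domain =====

-- B replaces A's stateful rotating-mask scan by a static precomputed permutation
-- table of input-bit positions (idiomatic rewrite; same cost).

-- ===== PORT A =====
-- inner 'while v5:' loop; v5 goes 32,16,8,4,2,1,0 so the test is v5 ≤ 0 ↔ v5 = 0 here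
def pvInner (st eax v4 v5 : Int) : Int × Int :=
  if _h : v5 ≤ 0 then (eax, v4)
  else
    let v4 := if PySem.Int.band eax st ≠ 0 then PySem.Int.bor v4 v5 else v4   -- if (eax & st): v4 = v4 | v5
    let eax := eax * 2                                                        -- eax = eax << 1
    let eax := if eax > 0x80000000 then 1 else eax
    pvInner st eax v4 (PySem.Int.floordiv v5 2)                               -- v5 = v5 >> 1
termination_by v5.toNat
decreasing_by
  rw [PySem.Int.floordiv_eq_ediv_of_pos (by omega : (0:Int) < 2)]; omega

-- outer 'while (v3 < 8):' loop
def pvOuter (st eax v3 : Int) (m : PySem.Dict Int Int) : PySem.Dict Int Int :=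
  if _h : v3 < 8 then
    let p := pvInner st eax 0 32
    let eax := PySem.Int.floordiv p.1 4                                       -- eax = eax >> 2
    pvOuter st eax (v3 + 1) (m.insert (v3 + 1) p.2)                           -- m_v4[v3] = v4 (after v3 += 1)
  else m
termination_by (8 - v3).toNat
decreasing_by omega

def sub_4dcf20 (st : Int) : List (Int × Int) :=
  (pvOuter st 0x80000000 0 PySem.Dict.empty).items

-- ===== PORT B =====
def pvPERM : List (List Nat) :=
  [[31, 0, 1, 2, 3, 4], [3, 4, 5, 6, 7, 8], [7, 8, 9, 10, 11, 12],
   [11, 12, 13, 14, 15, 16], [15, 16, 17, 18, 19, 20], [19, 20, 21, 22, 23, 24],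
   [23, 24, 25, 26, 27, 28], [27, 28, 29, 30, 31, 0]]

def pvWEIGHTS : List Int := [32, 16, 8, 4, 2, 1]

def sub_4dcf20_alt (st : Int) : List (Int × Int) :=
  ((PySem.List.enumerate pvPERM).foldl (fun m iRow =>
    m.insert (iRow.1 + 1)
      ((iRow.2.zip pvWEIGHTS).foldl (fun v pw =>
        if PySem.Int.band st (2 ^ pw.1) ≠ 0 then PySem.Int.bor v pw.2 else v) 0))  -- if st & (1 << pos): v |= w
    (PySem.Dict.empty : PySem.Dict Int Int)).items

-- ===== PRECONDITION & SPEC =====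
def Spec_sub_4dcf20 (st : Int) (out : List (Int × Int)) : Prop := out = sub_4dcf20_alt st
instance (st : Int) (out : List (Int × Int)) : Decidable (Spec_sub_4dcf20 st out) := by unfold Spec_sub_4dcf20; infer_instance

-- ===== CLAIM (what is proved, stated in full; the proofs are below) =====
def Claim_equal_sub_4dcf20 : Prop := ∀ (st : Int), Dom_sub_4dcf20 st → Spec_sub_4dcf20 st (sub_4dcf20 st)

-- ===== LEMMAS AND PROOFS =====

-- ===== VERDICT (by name: the statement is the Claim_ definition above) =====
theorem sub_4dcf20_spec : Claim_equal_sub_4dcf20 := by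
  intro st _
  show sub_4dcf20 st = sub_4dcf20_alt st
  simp [sub_4dcf20, sub_4dcf20_alt, pvOuter, pvInner, pvPERM, pvWEIGHTS,
        PySem.List.enumerate, PySem.Int.band_comm st]
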